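-- pv_equiv track=rewrite | github.com/fattypanda10/panda_projects | projects_hyperskill/Regex_engine.py | match_uneq_len_str_recur
-- ===== SOURCE A (Python) =====
-- def regex_str_comp(reg_ex, stringy):
--     if reg_ex == '':
--         return True
--     elif reg_ex == '' and stringy == '':
--         return True
--     elif reg_ex != '' and stringy == '':
--         return False
--     elif reg_ex == '.':
--         return True
--     else:
--         return reg_ex == stringy
--
-- def match_eq_len_str_recur(reg_ex, stringy):
--     if len(reg_ex) == 1 or len(reg_ex) == 0:
--         return regex_str_comp(reg_ex, stringy)
--     else:
--         checker = []
--         i, j = 0, 1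
--         while j != len(reg_ex) + 1:
--             checker.append(match_eq_len_str_recur(reg_ex[i:j], stringy[i:j]))
--             i += 1
--             j += 1
--     return True if all(checker) else False
--
-- def match_uneq_len_str_recur(reg_ex, stringy):
--     if len(reg_ex) > len(stringy):
--         return False
--
--     elif len(reg_ex) <= len(stringy):
--         i, j = 0, len(reg_ex)
--         check = []
--         while j != len(stringy) + 1:
--             check.append(match_eq_len_str_recur(reg_ex, stringy[i:j]))
--             i += 1
--             j += 1
--         return True if any(check) else False
-- ===== SOURCE B (Python) =====
-- def match_uneq_len_str_recur(reg_ex, stringy):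
--     m, n = len(reg_ex), len(stringy)
--     for start in range(n - m + 1):
--         k = 0
--         while k < m and (reg_ex[k] == '.' or reg_ex[k] == stringy[start + k]):
--             k += 1
--         if k == m:
--             return True
--     return False
-- ===== Notes on version B (the rewrite author's own statement) =====
-- stated objective: faster
-- what changed: Replaces the per-character recursion that slices strings and builds boolean lists for all/any with a direct index-based windowed scan that exits early on the first mismatch and the first matching window.
import Mathlib
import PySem

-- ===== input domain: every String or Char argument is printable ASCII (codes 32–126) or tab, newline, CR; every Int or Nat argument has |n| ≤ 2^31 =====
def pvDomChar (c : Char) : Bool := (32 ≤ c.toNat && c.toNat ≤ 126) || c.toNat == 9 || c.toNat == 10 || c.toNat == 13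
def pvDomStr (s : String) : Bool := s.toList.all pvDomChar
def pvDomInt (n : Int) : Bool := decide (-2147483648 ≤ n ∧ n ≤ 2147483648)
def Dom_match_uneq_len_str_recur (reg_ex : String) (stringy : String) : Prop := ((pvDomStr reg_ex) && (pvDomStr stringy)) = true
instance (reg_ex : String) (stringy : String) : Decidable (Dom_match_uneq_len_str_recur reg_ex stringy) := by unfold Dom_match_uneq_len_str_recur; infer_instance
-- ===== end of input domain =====

-- B replaces A's slice-and-recurse list building with an index-based windowed scan with early exit.

-- ===== PORT A =====
def pvRegexStrComp (r s : List Char) : Bool :=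
  if r = [] then true
  else if r = [] && s = [] then true
  else if r ≠ [] && s = [] then false
  else if r = ['.'] then true
  else r == s

def pvMatchEqLen (r s : List Char) : Bool :=
  if r.length = 1 ∨ r.length = 0 then pvRegexStrComp r s
  else
    let checker := (List.range r.length).map (fun (i : Nat) =>
      pvMatchEqLen (PySem.List.slice r (some (i : Int)) (some ((i : Int) + 1)))
                   (PySem.List.slice s (some (i : Int)) (some ((i : Int) + 1))))
    checker.all (fun b => b)
termination_by r.length
decreasing_by
  rename_i i
  have h2 : (PySem.List.slice r (some (i : Int)) (some ((i : Int) + 1))).length ≤ 1 := by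
    rw [PySem.List.length_slice]
    unfold PySem.List.clampIdx
    split_ifs <;> omega
  omega

def match_uneq_len_str_recur (reg_ex : String) (stringy : String) : Bool :=
  let r := reg_ex.toList
  let s := stringy.toList
  if r.length > s.length then false
  else
    let check := (List.range (s.length - r.length + 1)).map (fun (i : Nat) =>
      pvMatchEqLen r (PySem.List.slice s (some (i : Int)) (some ((i : Int) + (r.length : Int)))))
    check.any (fun b => b)

-- ===== PORT B =====
def pvScan (r s : List Char) (start : Nat) (k : Nat) : Nat :=
  if k < r.length ∧ (r[k]? = some '.' ∨ r[k]? = s[start + k]?) then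
    pvScan r s start (k + 1)
  else k
termination_by r.length - k
decreasing_by omega

def match_uneq_len_str_recur_alt (reg_ex : String) (stringy : String) : Bool :=
  let r := reg_ex.toList
  let s := stringy.toList
  (List.range (s.length + 1 - r.length)).any (fun start => pvScan r s start 0 = r.length)

-- ===== PRECONDITION & SPEC =====
def Spec_match_uneq_len_str_recur (reg_ex : String) (stringy : String) (out : Bool) : Prop := out = match_uneq_len_str_recur_alt reg_ex stringy
instance (reg_ex : String) (stringy : String) (out : Bool) : Decidable (Spec_match_uneq_len_str_recur reg_ex stringy out) := by unfold Spec_match_uneq_len_str_recur; infer_instance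

-- ===== CLAIM (what is proved, stated in full; the proofs are below) =====
def Claim_equal_match_uneq_len_str_recur : Prop := ∀ (reg_ex : String) (stringy : String), Dom_match_uneq_len_str_recur reg_ex stringy → Spec_match_uneq_len_str_recur reg_ex stringy (match_uneq_len_str_recur reg_ex stringy)

-- ===== LEMMAS AND PROOFS =====

theorem scan_eq_len_iff (r s : List Char) (start : Nat) : ∀ (k : Nat), k ≤ r.length →
    (pvScan r s start k = r.length ↔
      ∀ j, k ≤ j → j < r.length → (r[j]? = some '.' ∨ r[j]? = s[start + j]?)) := by
  intro k hk
  generalize hd : r.length - k = d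
  induction d generalizing k with
  | zero =>
    have hk' : k = r.length := by omega
    rw [pvScan]
    have : ¬ (k < r.length ∧ (r[k]? = some '.' ∨ r[k]? = s[start + k]?)) := by
      intro h; omega
    rw [if_neg this]
    constructor
    · intro _ j hj1 hj2; omega
    · intro _; omega
  | succ d ih =>
    rw [pvScan]
    by_cases hc : k < r.length ∧ (r[k]? = some '.' ∨ r[k]? = s[start + k]?)
    · rw [if_pos hc]
      rw [ih (k + 1) (by omega) (by omega)]
      constructor
      · intro h j hj1 hj2
        rcases Nat.eq_or_lt_of_le hj1 with h' | h'
        · subst h'; exact hc.2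
        · exact h j h' hj2
      · intro h j hj1 hj2; exact h j (by omega) hj2
    · rw [if_neg hc]
      constructor
      · intro h; omega
      · intro h
        exfalso
        apply hc
        have hkl : k < r.length := by omega
        exact ⟨hkl, h k le_rfl hkl⟩

theorem slice_singleton {α : Type} (l : List α) (i : Nat) (hi : i < l.length) :
    PySem.List.slice l (some (i : Int)) (some ((i : Int) + 1)) = [l[i]] := by
  rw [PySem.List.slice_toNat l (by positivity) (by positivity)]
  simp only [Int.toNat_natCast]
  have : ((i : Int) + 1).toNat = i + 1 := by omega
  rw [this, Nat.add_sub_cancel_left]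
  rw [List.drop_eq_getElem_cons hi]
  rfl

theorem matchEq_single (a b : Char) :
    pvMatchEqLen [a] [b] = (decide (a = '.') || a == b) := by
  rw [pvMatchEqLen]
  simp [pvRegexStrComp]

theorem matchEq_char (r w : List Char) (h : w.length = r.length) :
    pvMatchEqLen r w = decide (∀ j, j < r.length → (r[j]? = some '.' ∨ r[j]? = w[j]?)) := by
  rcases r with _ | ⟨a, _ | ⟨a2, rt⟩⟩
  · have hw : w = [] := List.length_eq_zero_iff.mp (by simpa using h)
    subst hw
    rw [pvMatchEqLen]; simp [pvRegexStrComp]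
  · obtain ⟨b, rfl⟩ : ∃ b, w = [b] := List.length_eq_one_iff.mp (by simpa using h)
    rw [matchEq_single]
    apply Bool.eq_iff_iff.mpr
    simp
  · rw [pvMatchEqLen, if_neg (by simp)]
    simp only []
    apply Bool.eq_iff_iff.mpr
    rw [List.all_eq_true, decide_eq_true_eq]
    constructor
    · intro hall j hj
      have := hall _ (List.mem_map.mpr ⟨j, List.mem_range.mpr hj, rfl⟩)
      rw [slice_singleton _ j hj, slice_singleton w j (by omega), matchEq_single] at this
      simp only [Bool.or_eq_true, decide_eq_true_eq, beq_iff_eq] at this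
      rw [List.getElem?_eq_getElem hj, List.getElem?_eq_getElem (show j < w.length by omega)]
      rcases this with h' | h'
      · left; rw [h']
      · right; rw [h']
    · intro hall x hx
      obtain ⟨j, hj, rfl⟩ := List.mem_map.mp hx
      rw [List.mem_range] at hj
      rw [slice_singleton _ j hj, slice_singleton w j (by omega), matchEq_single]
      have := hall j hj
      rw [List.getElem?_eq_getElem hj, List.getElem?_eq_getElem (show j < w.length by omega)] at this
      simp only [Option.some_inj] at this
      simp only [Bool.or_eq_true, decide_eq_true_eq, beq_iff_eq]
      exact this

theorem window_eq (r s : List Char) (i : Nat)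
    (hi : i + r.length ≤ s.length) :
    pvMatchEqLen r (PySem.List.slice s (some (i : Int)) (some ((i : Int) + (r.length : Int))))
      = decide (pvScan r s i 0 = r.length) := by
  rw [PySem.List.slice_toNat s (by positivity) (by positivity)]
  simp only [Int.toNat_natCast]
  have hb : ((i : Int) + (r.length : Int)).toNat = i + r.length := by omega
  rw [hb, Nat.add_sub_cancel_left]
  have hw : ((s.drop i).take r.length).length = r.length := by
    simp [List.length_take, List.length_drop]; omega
  rw [matchEq_char _ _ hw]
  apply decide_eq_decide.mpr
  rw [scan_eq_len_iff r s i 0 (Nat.zero_le _)]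
  constructor
  · intro hall j _ hj
    have := hall j hj
    rwa [List.getElem?_take_of_lt hj, List.getElem?_drop] at this
  · intro hall j hj
    have := hall j (Nat.zero_le _) hj
    rwa [List.getElem?_take_of_lt hj, List.getElem?_drop]

-- ===== VERDICT (by name: the statement is the Claim_ definition above) =====
theorem match_uneq_len_str_recur_spec : Claim_equal_match_uneq_len_str_recur := by
  intro reg_ex stringy _
  unfold Spec_match_uneq_len_str_recur match_uneq_len_str_recur match_uneq_len_str_recur_alt
  simp only []
  set r := reg_ex.toList with hr
  set s := stringy.toList with hs
  by_cases hmn : r.length > s.length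
  · rw [if_pos hmn]
    have h0 : s.length + 1 - r.length = 0 := by omega
    rw [h0]
    simp
  · rw [if_neg hmn]
    rw [Nat.not_lt] at hmn
    have hcnt : s.length - r.length + 1 = s.length + 1 - r.length := by omega
    rw [hcnt, List.any_map]
    apply Bool.eq_iff_iff.mpr
    rw [List.any_eq_true, List.any_eq_true]
    constructor
    · rintro ⟨i, hi, hfi⟩
      rw [List.mem_range] at hi
      refine ⟨i, List.mem_range.mpr hi, ?_⟩
      simp only [Function.comp_apply] at hfi
      rw [← window_eq r s i (by omega)]
      exact hfi
    · rintro ⟨i, hi, hfi⟩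
      rw [List.mem_range] at hi
      refine ⟨i, List.mem_range.mpr hi, ?_⟩
      simp only [Function.comp_apply]
      rw [window_eq r s i (by omega)]
      exact hfi
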